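-- pv_equiv track=rewrite | github.com/shisinbin/barham-books | staff/helpers.py | choose_best_isbn
-- ===== SOURCE A (Python) =====
-- def choose_best_isbn(isbns):
--     for i in isbns:
--         if len(i) == 13:
--             return i
--     for i in isbns:
--         if len(i) == 10:
--             return i
--     return ""
-- ===== SOURCE B (Python) =====
-- def choose_best_isbn(isbns):
--     fallback = None
--     for i in isbns:
--         if len(i) == 13:
--             return i
--         if len(i) == 10 and fallback is None:
--             fallback = i
--     return fallback if fallback is not None else ""
-- ===== Notes on version B (the rewrite author's own statement) =====
-- stated objective: simpler
-- what changed: Replaced A's two sequential scans by a single pass that returns a 13-char ISBN immediately while maintaining a cross-iteration fallback accumulator for the first 10-char ISBN seen.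
import Mathlib
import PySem

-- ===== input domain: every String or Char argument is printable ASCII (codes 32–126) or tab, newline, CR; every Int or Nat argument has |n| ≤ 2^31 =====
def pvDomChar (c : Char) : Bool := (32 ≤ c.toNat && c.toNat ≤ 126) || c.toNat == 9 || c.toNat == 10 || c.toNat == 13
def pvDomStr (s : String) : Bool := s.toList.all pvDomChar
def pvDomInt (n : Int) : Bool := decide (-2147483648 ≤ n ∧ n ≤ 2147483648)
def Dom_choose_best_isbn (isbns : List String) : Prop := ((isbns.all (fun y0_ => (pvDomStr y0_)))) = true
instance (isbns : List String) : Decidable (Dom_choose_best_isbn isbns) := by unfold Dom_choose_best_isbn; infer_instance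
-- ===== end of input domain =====

-- B changes A's two sequential scans into one pass with a fallback accumulator; objective: simpler.

-- ===== PORT A =====
-- first loop of A: return the first string of length 13, if any
def pvFind13 : List String → Option String
  | [] => none
  | i :: rest => if PySem.Str.len i = 13 then some i else pvFind13 rest

-- second loop of A: return the first string of length 10, if any
def pvFind10 : List String → Option String
  | [] => none
  | i :: rest => if PySem.Str.len i = 10 then some i else pvFind10 rest

def choose_best_isbn (isbns : List String) : String :=
  match pvFind13 isbns with
  | some i => i
  | none =>
    match pvFind10 isbns with
    | some i => i
    | none => ""

-- ===== PORT B =====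
-- single pass of Source B: 'fallback' holds the first 10-char ISBN seen so far
def pvAltLoop : List String → Option String → String
  | [], fallback => fallback.getD ""
  | i :: rest, fallback =>
    if PySem.Str.len i = 13 then i
    else pvAltLoop rest (if PySem.Str.len i = 10 ∧ fallback = none then some i else fallback)

def choose_best_isbn_alt (isbns : List String) : String := pvAltLoop isbns none

-- ===== PRECONDITION & SPEC =====
def Spec_choose_best_isbn (isbns : List String) (out : String) : Prop := out = choose_best_isbn_alt isbns
instance (isbns : List String) (out : String) : Decidable (Spec_choose_best_isbn isbns out) := by unfold Spec_choose_best_isbn; infer_instance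

-- ===== CLAIM (what is proved, stated in full; the proofs are below) =====
def Claim_equal_choose_best_isbn : Prop := ∀ (isbns : List String), Dom_choose_best_isbn isbns → Spec_choose_best_isbn isbns (choose_best_isbn isbns)

-- ===== LEMMAS AND PROOFS =====
theorem pvAltLoop_eq (xs : List String) (fb : Option String) :
    pvAltLoop xs fb =
      match pvFind13 xs with
      | some i => i
      | none => (fb.orElse (fun _ => pvFind10 xs)).getD "" := by
  induction xs generalizing fb with
  | nil => cases fb <;> simp [pvAltLoop, pvFind13, pvFind10, Option.orElse]
  | cons i rest ih =>
    simp only [pvAltLoop, pvFind13, pvFind10, PySem.Str.len]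
    by_cases h13 : (i.length : Int) = 13
    · simp [h13]
    · simp only [ih]
      cases hfind : pvFind13 rest with
      | some j => simp [h13]
      | none =>
        by_cases h10 : (i.length : Int) = 10
        · cases fb <;> simp [h10, Option.orElse]
        · cases fb <;> simp [h13, h10, Option.orElse]

-- ===== VERDICT (by name: the statement is the Claim_ definition above) =====
theorem choose_best_isbn_spec : Claim_equal_choose_best_isbn := by
  intro isbns _
  unfold Spec_choose_best_isbn choose_best_isbn choose_best_isbn_alt
  rw [pvAltLoop_eq]
  cases pvFind13 isbns <;> cases h : pvFind10 isbns <;> simp [Option.orElse]
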